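-- pv_equiv track=rewrite | github.com/sleepy-monax/coders-in-space | tournoi/21/mining_wars_gr_21.py | create_initial_board_content
-- ===== SOURCE A (Python) =====
-- def create_initial_board_content(map_properties):
--     """ Creates the matrix of the board from the map properties
--
--     Parameters
--     ----------
--     map_properties: The properties of the Map (tuple)
--
--     Returns
--     -------
--     board_matrix: The matrix of the board (list)
--
--     Note
--     ----
--     The matrix is a list of lists
--
--     Version
--     -------
--     specification: Killian Thys (v.1 27/02/18)
--     implementation: Poitier Pierre (v.2 03/03/18)
--     """
--
--     # The matrix of the board, which is going to contain the rows (list of lists)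
--     board_matrix = []
--
--     # Size of the map
--     rows_nbr = map_properties[0]
--     columns_nbr = map_properties[1]
--
--     # Create the bottom border
--     bottom_border = list('||' + ('-' * columns_nbr) + '|')
--
--     # Create the top border
--     top_border_up = bottom_border[:]
--     top_border_down = bottom_border[:]
--
--     # Add the position indicators in the top border
--     for n in range(1, columns_nbr // 5):
--         position_nbr = n * 5
--         if position_nbr > 9:
--             top_border_up[position_nbr + 1] = str(position_nbr)[0]
--             top_border_down[position_nbr + 1] = str(position_nbr)[1]
--         else:
--             top_border_down[position_nbr + 1] = str(position_nbr)
--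
--     # Add the top border to the matrix
--     board_matrix.append(top_border_up)
--     board_matrix.append(top_border_down)
--
--     for row in range(1, rows_nbr+2):
--         # Add the left border in the row
--         if (row % 5) == 0:
--             # Add a position indicator
--             row_content = str(row)
--
--             if len(row_content) < 2:
--                 row_content += '|'
--         else:
--             # Add a basic left border
--             row_content = '||'
--
--         # Fill the row with empty tiles
--         row_content += ' ' * columns_nbr
--         # Add the right border
--         row_content += '|'
--
--         # Add the row to the matrix of the board
--         board_matrix.append(list(row_content))
--
--     # Add the bottom border
--     board_matrix.append(bottom_border)
--
--     return board_matrix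
-- ===== SOURCE B (Python) =====
-- def create_initial_board_content(map_properties):
--     """Pure, index-based reconstruction: every cell of the top borders is
--     computed directly from its coordinates and each row is built by a
--     comprehension; no list is ever mutated."""
--     rows_nbr, cols = map_properties
--     width = max(cols, 0) + 3
--     n_blanks = max(cols, 0)
--
--     def border_char(i):
--         return '|' if i < 2 or i == width - 1 else '-'
--
--     def top_char(i, lower):
--         p = i - 1
--         if i >= 6 and p % 5 == 0 and p // 5 <= cols // 5 - 1:
--             s = str(p)
--             if p > 9:
--                 return s[1] if lower else s[0]
--             if lower:
--                 return s
--         return border_char(i)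
--
--     border = [border_char(i) for i in range(width)]
--     top_up = [top_char(i, False) for i in range(width)]
--     top_down = [top_char(i, True) for i in range(width)]
--
--     def mid_row(r):
--         if r % 5 == 0:
--             lab = str(r)
--             if len(lab) < 2:
--                 lab += '|'
--         else:
--             lab = '||'
--         return list(lab) + [' '] * n_blanks + ['|']
--
--     return [top_up, top_down] + [mid_row(r) for r in range(1, rows_nbr + 2)] + [border]
-- ===== Notes on version B (the rewrite author's own statement) =====
-- stated objective: alternative
-- what changed: A mutates a copied border row in-place to stamp column indicators and grows the matrix by appending rows; B computes every top-border cell directly from its coordinates (a per-index closed form) and builds each row by a comprehension, with no mutation anywhere.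
import Mathlib
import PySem

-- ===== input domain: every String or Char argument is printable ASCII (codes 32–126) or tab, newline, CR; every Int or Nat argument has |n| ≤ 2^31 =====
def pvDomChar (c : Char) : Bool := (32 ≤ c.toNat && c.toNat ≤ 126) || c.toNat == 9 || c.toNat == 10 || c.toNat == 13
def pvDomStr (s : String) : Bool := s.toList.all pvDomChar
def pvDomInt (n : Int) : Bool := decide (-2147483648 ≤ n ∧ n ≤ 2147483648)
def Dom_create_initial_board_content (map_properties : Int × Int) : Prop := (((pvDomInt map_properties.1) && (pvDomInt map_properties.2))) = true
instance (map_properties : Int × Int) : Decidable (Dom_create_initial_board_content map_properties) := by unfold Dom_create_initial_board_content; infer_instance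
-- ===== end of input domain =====

-- B rebuilds the board purely per index (each top-border cell computed directly from its
-- coordinates, rows by comprehension, no mutation) instead of A's mutate-and-append loops;
-- objective: alternative.

-- list('…')[k] as a one-character string (both Pythons index str(n) only in range where executed)
def pvCell (c : Char) : String := String.mk [c]
def pvDigitStr (n : Int) (k : Nat) : String :=
  match (PySem.Int.toChars n).drop k with
  | c :: _ => String.mk [c]
  | [] => ""

-- ===== PORT A =====
-- loop body of A's position-indicator loop, verbatim
def pvA_colStep (st : List String × List String) (n : Int) : List String × List String :=
  if n * 5 > 9 then
    (st.1.set (n * 5 + 1).toNat (pvDigitStr (n * 5) 0),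
     st.2.set (n * 5 + 1).toNat (pvDigitStr (n * 5) 1))
  else
    (st.1, st.2.set (n * 5 + 1).toNat (PySem.Int.toStr (n * 5)))

-- body of A's row loop, verbatim ('row_content' built left to right, then list())
def pvA_rowFn (columns_nbr row : Int) : List String :=
  let row_content : List Char :=
    if PySem.Int.mod row 5 = 0 then
      let rc := PySem.Int.toChars row
      if rc.length < 2 then rc ++ ['|'] else rc
    else ['|', '|']
  let row_content := row_content ++ List.replicate columns_nbr.toNat ' '
  let row_content := row_content ++ ['|']
  row_content.map pvCell

def create_initial_board_content (map_properties : Int × Int) : List (List String) :=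
  let rows_nbr := map_properties.1
  let columns_nbr := map_properties.2
  let bottom_border : List String :=
    (['|', '|'] ++ List.replicate columns_nbr.toNat '-' ++ ['|']).map pvCell
  let tops :=
    (PySem.List.pyRange 1 (PySem.Int.floordiv columns_nbr 5) 1).foldl pvA_colStep
      (bottom_border, bottom_border)
  let board_matrix :=
    (PySem.List.pyRange 1 (rows_nbr + 2) 1).foldl
      (fun acc row => acc ++ [pvA_rowFn columns_nbr row]) [tops.1, tops.2]
  board_matrix ++ [bottom_border]

-- ===== PORT B =====
def pvB_borderChar (cols i : Int) : String :=
  if i < 2 ∨ i = (max cols 0 + 3) - 1 then "|" else "-"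

def pvB_topChar (cols i : Int) (lower : Bool) : String :=
  if 6 ≤ i ∧ PySem.Int.mod (i - 1) 5 = 0 ∧
      PySem.Int.floordiv (i - 1) 5 ≤ PySem.Int.floordiv cols 5 - 1 then
    if 9 < i - 1 then (if lower then pvDigitStr (i - 1) 1 else pvDigitStr (i - 1) 0)
    else if lower then PySem.Int.toStr (i - 1) else pvB_borderChar cols i
  else pvB_borderChar cols i

def pvB_midRow (cols r : Int) : List String :=
  let lab : List Char :=
    if PySem.Int.mod r 5 = 0 then
      let l := PySem.Int.toChars r
      if l.length < 2 then l ++ ['|'] else l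
    else ['|', '|']
  lab.map pvCell ++ List.replicate (max cols 0).toNat " " ++ ["|"]

def create_initial_board_content_alt (map_properties : Int × Int) : List (List String) :=
  let rows_nbr := map_properties.1
  let cols := map_properties.2
  let width : Int := max cols 0 + 3
  let border := (PySem.List.pyRange 0 width 1).map (pvB_borderChar cols)
  let top_up := (PySem.List.pyRange 0 width 1).map (fun i => pvB_topChar cols i false)
  let top_down := (PySem.List.pyRange 0 width 1).map (fun i => pvB_topChar cols i true)
  [top_up, top_down] ++ (PySem.List.pyRange 1 (rows_nbr + 2) 1).map (pvB_midRow cols) ++ [border]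

-- ===== PRECONDITION & SPEC =====
def Spec_create_initial_board_content (map_properties : Int × Int) (out : List (List String)) : Prop := out = create_initial_board_content_alt map_properties
instance (map_properties : Int × Int) (out : List (List String)) : Decidable (Spec_create_initial_board_content map_properties out) := by unfold Spec_create_initial_board_content; infer_instance

-- ===== CLAIM (what is proved, stated in full; the proofs are below) =====
def Claim_equal_create_initial_board_content : Prop := ∀ (map_properties : Int × Int), Dom_create_initial_board_content map_properties → Spec_create_initial_board_content map_properties (create_initial_board_content map_properties)

-- ===== LEMMAS AND PROOFS =====

theorem pv_bchars_get (k i : Nat) (h : i < k + 3) :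
    (['|', '|'] ++ List.replicate k '-' ++ ['|'])[i]'(by simp; omega)
      = if i < 2 ∨ i = k + 2 then '|' else '-' := by
  match i with
  | 0 => rfl
  | 1 => rfl
  | (j+2) =>
    simp only [List.cons_append, List.getElem_cons_succ, List.nil_append]
    by_cases hj : j < k
    · rw [List.getElem_append_left (by simpa using hj), List.getElem_replicate]
      have : ¬(j + 2 < 2 ∨ j + 2 = k + 2) := by omega
      rw [if_neg this]
    · have hjk : j = k := by omega
      subst hjk
      rw [List.getElem_append_right (by simp)]
      simp

-- B's per-index border row is A's bottom border
theorem pv_border_eq (c : Int) :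
    (PySem.List.pyRange 0 (max c 0 + 3) 1).map (pvB_borderChar c)
      = (['|', '|'] ++ List.replicate c.toNat '-' ++ ['|']).map pvCell := by
  rw [PySem.List.pyRange_one]
  apply List.ext_getElem
  · simp; omega
  · intro i h1 h2
    simp only [List.map_map, List.getElem_map, List.getElem_range, Function.comp]
    have h1' : i < c.toNat + 3 := by simp at h2; omega
    rw [pv_bchars_get c.toNat i h1']
    simp only [pvB_borderChar]
    have hcond : ((0 + (i : Int)) < 2 ∨ (0 + (i : Int)) = (max c 0 + 3) - 1)
        ↔ (i < 2 ∨ i = c.toNat + 2) := by omega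
    rw [if_congr hcond rfl rfl, apply_ite pvCell]
    rfl

-- top-cell formula with an explicit bound t in place of cols // 5
def pvF (cols t i : Int) (lower : Bool) : String :=
  if 6 ≤ i ∧ PySem.Int.mod (i - 1) 5 = 0 ∧ PySem.Int.floordiv (i - 1) 5 ≤ t - 1 then
    if 9 < i - 1 then (if lower then pvDigitStr (i - 1) 1 else pvDigitStr (i - 1) 0)
    else if lower then PySem.Int.toStr (i - 1) else pvB_borderChar cols i
  else pvB_borderChar cols i

theorem pvF_succ_ne (c t i : Int) (lower : Bool) (hne : i ≠ 5 * t + 1) :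
    pvF c (t + 1) i lower = pvF c t i lower := by
  unfold pvF
  have hp := PySem.Int.floordiv_mul_add_mod (i - 1) 5
  have hcond : (6 ≤ i ∧ PySem.Int.mod (i - 1) 5 = 0 ∧
        PySem.Int.floordiv (i - 1) 5 ≤ t + 1 - 1)
      ↔ (6 ≤ i ∧ PySem.Int.mod (i - 1) 5 = 0 ∧
        PySem.Int.floordiv (i - 1) 5 ≤ t - 1) := by omega
  rw [if_congr hcond rfl rfl]

theorem pvF_at (c t : Int) (lower : Bool) (ht : 1 ≤ t) :
    pvF c (t + 1) (5 * t + 1) lower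
      = if 9 < 5 * t then (if lower then pvDigitStr (5 * t) 1 else pvDigitStr (5 * t) 0)
        else if lower then PySem.Int.toStr (5 * t) else pvB_borderChar c (5 * t + 1) := by
  unfold pvF
  have h1 : (5 * t + 1) - 1 = 5 * t := by ring
  rw [h1]
  have hmod : PySem.Int.mod (5 * t) 5 = 0 := by
    rw [PySem.Int.mod_eq_zero_iff_dvd]; exact Dvd.intro t rfl
  have hdiv : PySem.Int.floordiv (5 * t) 5 = t := by
    rw [PySem.Int.floordiv_eq_iff_of_pos (by norm_num)]; omega
  rw [if_pos ⟨by omega, hmod, by omega⟩]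

-- for a bound t ≤ 1 the top-cell formula is just the border
theorem pv_base (c t : Int) (ht : t ≤ 1) (lower : Bool) :
    (PySem.List.pyRange 0 (max c 0 + 3) 1).map (fun i => pvF c t i lower)
      = (['|', '|'] ++ List.replicate c.toNat '-' ++ ['|']).map pvCell := by
  have hfun : ∀ i : Int, pvF c t i lower = pvB_borderChar c i := by
    intro i
    unfold pvF
    rw [if_neg]
    rintro ⟨h6, -, hle⟩
    have : 1 ≤ PySem.Int.floordiv (i - 1) 5 := by
      rw [PySem.Int.le_floordiv_iff_mul_le (by norm_num)]; omega
    omega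
  calc (PySem.List.pyRange 0 (max c 0 + 3) 1).map (fun i => pvF c t i lower)
      = (PySem.List.pyRange 0 (max c 0 + 3) 1).map (pvB_borderChar c) := by
        exact List.map_congr_left (fun i _ => hfun i)
    _ = _ := pv_border_eq c

-- setting the indicator cell takes the formula from bound t to bound t+1
theorem pv_set_comp (c t : Int) (lower : Bool) (ht : 1 ≤ t)
    (htm : t ≤ PySem.Int.floordiv c 5 - 1) (v : String)
    (hv : v = pvF c (t + 1) (5 * t + 1) lower) :
    ((PySem.List.pyRange 0 (max c 0 + 3) 1).map (fun i => pvF c t i lower)).set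
        (t * 5 + 1).toNat v
      = (PySem.List.pyRange 0 (max c 0 + 3) 1).map (fun i => pvF c (t + 1) i lower) := by
  have hc5 : 5 * PySem.Int.floordiv c 5 ≤ c := by
    have := PySem.Int.floordiv_mul_add_mod c 5
    have := PySem.Int.mod_nonneg c (b := 5) (by norm_num)
    omega
  apply List.ext_getElem
  · simp
  · intro j h1 h2
    rw [List.getElem_set]
    simp only [List.getElem_map, PySem.List.getElem_pyRange_one]
    have hjw : (j : Int) < max c 0 + 3 := by
      simp only [List.length_map, PySem.List.length_pyRange_one] at h2
      omega
    by_cases he : (t * 5 + 1).toNat = j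
    · rw [if_pos he]
      have : (0 + (j : Int)) = 5 * t + 1 := by omega
      rw [this, hv]
    · rw [if_neg he]
      exact (pvF_succ_ne c t (0 + (j : Int)) lower (by omega)).symm

theorem pv_step (c t : Int) (ht : 1 ≤ t) (htm : t ≤ PySem.Int.floordiv c 5 - 1) :
    pvA_colStep
        ((PySem.List.pyRange 0 (max c 0 + 3) 1).map (fun i => pvF c t i false),
         (PySem.List.pyRange 0 (max c 0 + 3) 1).map (fun i => pvF c t i true)) t
      = ((PySem.List.pyRange 0 (max c 0 + 3) 1).map (fun i => pvF c (t + 1) i false),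
         (PySem.List.pyRange 0 (max c 0 + 3) 1).map (fun i => pvF c (t + 1) i true)) := by
  unfold pvA_colStep
  by_cases hbig : t * 5 > 9
  · rw [if_pos hbig]
    refine Prod.ext ?_ ?_ <;> simp only
    · rw [pv_set_comp c t false ht htm _ ?_]
      rw [pvF_at c t false ht, if_pos (by omega)]
      simp [show t * 5 = 5 * t by ring]
    · rw [pv_set_comp c t true ht htm _ ?_]
      rw [pvF_at c t true ht, if_pos (by omega)]
      simp [show t * 5 = 5 * t by ring]
  · rw [if_neg hbig]
    have ht1 : t = 1 := by omega
    refine Prod.ext ?_ ?_ <;> simp only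
    · subst ht1
      apply List.map_congr_left
      intro i _
      by_cases hi : i = 5 * 1 + 1
      · subst hi
        have e1 : pvF c 1 (5 * 1 + 1) false = pvB_borderChar c (5 * 1 + 1) := by
          unfold pvF
          rw [if_neg (by decide)]
        have e2 : pvF c (1 + 1) (5 * 1 + 1) false = pvB_borderChar c (5 * 1 + 1) := by
          unfold pvF
          rw [if_pos (by decide), if_neg (by decide)]
          simp
        rw [e1, e2]
      · exact (pvF_succ_ne c 1 i false hi).symm
    · rw [pv_set_comp c t true ht htm _ ?_]
      rw [pvF_at c t true ht, if_neg (by omega)]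
      simp [show t * 5 = 5 * t by ring]

theorem pv_top_fold (c : Int) (s : Nat)
    (hs : (s : Int) ≤ PySem.Int.floordiv c 5 - 1) :
    (PySem.List.pyRange 1 (1 + (s : Int)) 1).foldl pvA_colStep
        ((['|', '|'] ++ List.replicate c.toNat '-' ++ ['|']).map pvCell,
         (['|', '|'] ++ List.replicate c.toNat '-' ++ ['|']).map pvCell)
      = ((PySem.List.pyRange 0 (max c 0 + 3) 1).map (fun i => pvF c (1 + (s : Int)) i false),
         (PySem.List.pyRange 0 (max c 0 + 3) 1).map (fun i => pvF c (1 + (s : Int)) i true)) := by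
  induction s with
  | zero =>
    rw [show ((0 : Nat) : Int) = 0 by rfl]
    rw [PySem.List.pyRange_one_eq_nil (by norm_num)]
    simp only [List.foldl_nil]
    rw [pv_base c (1 + 0) (by norm_num) false, pv_base c (1 + 0) (by norm_num) true]
  | succ n ih =>
    have hn : (n : Int) ≤ PySem.Int.floordiv c 5 - 1 := by push_cast at hs ⊢; omega
    have hsplit : (1 + ((n + 1 : Nat) : Int)) = (1 + (n : Int)) + 1 := by push_cast; ring
    rw [hsplit, PySem.List.pyRange_one_succ_right (by omega), List.foldl_append,
      ih hn]
    simp only [List.foldl_cons, List.foldl_nil]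
    exact pv_step c (1 + (n : Int)) (by omega) (by push_cast at hs; omega)

theorem pv_row_eq (c r : Int) : pvA_rowFn c r = pvB_midRow c r := by
  unfold pvA_rowFn pvB_midRow
  have hmax : (max c 0).toNat = c.toNat := by omega
  rw [hmax]
  simp only [List.map_append, List.map_replicate, List.append_assoc]
  rfl

-- ===== VERDICT (by name: the statement is the Claim_ definition above) =====
theorem create_initial_board_content_spec : Claim_equal_create_initial_board_content := by
  intro mp _hd
  obtain ⟨r, c⟩ := mp
  show create_initial_board_content (r, c) = create_initial_board_content_alt (r, c)
  simp only [create_initial_board_content, create_initial_board_content_alt]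
  have htops :
      (PySem.List.pyRange 1 (PySem.Int.floordiv c 5) 1).foldl pvA_colStep
          ((['|', '|'] ++ List.replicate c.toNat '-' ++ ['|']).map pvCell,
           (['|', '|'] ++ List.replicate c.toNat '-' ++ ['|']).map pvCell)
        = ((PySem.List.pyRange 0 (max c 0 + 3) 1).map
             (fun i => pvF c (PySem.Int.floordiv c 5) i false),
           (PySem.List.pyRange 0 (max c 0 + 3) 1).map
             (fun i => pvF c (PySem.Int.floordiv c 5) i true)) := by
    by_cases hm : PySem.Int.floordiv c 5 ≤ 1
    · rw [PySem.List.pyRange_one_eq_nil hm]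
      simp only [List.foldl_nil]
      rw [pv_base c _ hm false, pv_base c _ hm true]
    · have hrepr : PySem.Int.floordiv c 5
          = 1 + ((PySem.Int.floordiv c 5 - 1).toNat : Int) := by omega
      rw [hrepr]
      exact pv_top_fold c _ (by omega)
  rw [htops, PySem.List.foldl_append_singleton_eq_map]
  have hrow : pvA_rowFn c = pvB_midRow c := funext (pv_row_eq c)
  rw [hrow, pv_border_eq c]
  simp only [List.append_assoc]
  rfl
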